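-- pv_equiv track=rewrite | github.com/LuCotti/Programacion | UTN/2_Cuatrimestre_1/1_Programacion_1/guia_de_ejercicios/resoluciones_2/6._Arrays_Unidimensionales_Parte_I/ejercicio_05_encontrar_maximos.py | posiciones_maximo
-- ===== SOURCE A (Python) =====
-- def posiciones_maximo(lista: list)-> list:
--     posiciones_maximo = []
--     valor_maximo = 0
--     for i in range(len(lista)):
--         if i == 0:
--             posiciones_maximo += [i]
--             valor_maximo = lista[i]
--         elif lista[i] >= valor_maximo:
--             posiciones_maximo += [i]
--             valor_maximo = lista[i]
--     return posiciones_maximo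
-- ===== SOURCE B (Python) =====
-- def posiciones_maximo(lista: list) -> list:
--     # Two phases: build the prefix-maximum table, then select matching indices.
--     running = []
--     m = None
--     for x in lista:
--         m = x if m is None else max(m, x)
--         running.append(m)
--     return [i for i in range(len(lista)) if lista[i] == running[i]]
-- ===== Notes on version B (the rewrite author's own statement) =====
-- stated objective: alternative
-- what changed: Replaces A's single fused scan (running max + conditional append in one loop with an i==0 special case) by two separate phases: a first pass building a prefix-maximum table, then a selection pass collecting the indices where the element equals its prefix maximum.
import Mathlib
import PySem

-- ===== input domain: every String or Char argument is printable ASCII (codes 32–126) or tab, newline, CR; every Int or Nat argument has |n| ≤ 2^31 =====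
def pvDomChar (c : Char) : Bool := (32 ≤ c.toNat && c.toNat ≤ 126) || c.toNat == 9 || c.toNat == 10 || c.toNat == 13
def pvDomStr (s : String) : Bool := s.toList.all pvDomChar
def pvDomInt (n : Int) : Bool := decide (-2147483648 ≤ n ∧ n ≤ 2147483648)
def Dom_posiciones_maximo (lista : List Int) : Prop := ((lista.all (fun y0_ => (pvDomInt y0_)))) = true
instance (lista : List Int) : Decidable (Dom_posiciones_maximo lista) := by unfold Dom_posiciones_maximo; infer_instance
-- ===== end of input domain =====

-- B builds a prefix-maximum table and then selects matching indices, instead of A's fused scan (objective: alternative decomposition).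

-- ===== PORT A =====
-- literal port of A's fused loop over range(len(lista)); lista[i] is always in range, so pyGetD is exact
def posiciones_maximo (lista : List Int) : List Int :=
  ((PySem.List.pyRange 0 (lista.length : Int) 1).foldl
    (fun (st : List Int × Int) i =>
      if i == 0 then (st.1 ++ [i], PySem.List.pyGetD lista i 0)
      else if PySem.List.pyGetD lista i 0 ≥ st.2 then (st.1 ++ [i], PySem.List.pyGetD lista i 0)
      else st)
    ([], 0)).1

-- ===== PORT B =====
-- literal port of Source B: phase 1 builds the prefix-maximum table, phase 2 filters the indices
def posiciones_maximo_alt (lista : List Int) : List Int :=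
  let running := (lista.foldl
    (fun (acc : List Int × Option Int) x =>
      let m := match acc.2 with
        | none => x
        | some m0 => max m0 x
      (acc.1 ++ [m], some m))
    ([], none)).1
  (PySem.List.pyRange 0 (lista.length : Int) 1).filter
    (fun i => PySem.List.pyGetD lista i 0 == PySem.List.pyGetD running i 0)

-- ===== PRECONDITION & SPEC =====
def Spec_posiciones_maximo (lista : List Int) (out : List Int) : Prop := out = posiciones_maximo_alt lista
instance (lista : List Int) (out : List Int) : Decidable (Spec_posiciones_maximo lista out) := by unfold Spec_posiciones_maximo; infer_instance

-- ===== CLAIM (what is proved, stated in full; the proofs are below) =====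
def Claim_equal_posiciones_maximo : Prop := ∀ (lista : List Int), Dom_posiciones_maximo lista → Spec_posiciones_maximo lista (posiciones_maximo lista)

-- ===== LEMMAS AND PROOFS =====

-- common structural reference: indices of elements ≥ current max, counting from index i with current max m
def pvGo : List Int → Int → Int → List Int
  | [], _, _ => []
  | x :: xs, i, m => if m ≤ x then i :: pvGo xs (i+1) x else pvGo xs (i+1) m

-- prefix maxima of xs continuing from current max m
def pvPmax : List Int → Int → List Int
  | [], _ => []
  | x :: xs, m => max m x :: pvPmax xs (max m x)

lemma pvDrop_cons {lista xs : List Int} {x : Int} {k : Nat} (h : lista.drop k = x :: xs) :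
    k < lista.length ∧ lista[k]? = some x ∧ lista.drop (k+1) = xs := by
  have h0 : lista[k]? = some x := by
    have h1 : lista[k + 0]? = some x := by
      rw [← List.getElem?_drop]
      simp [h]
    simpa using h1
  refine ⟨(List.getElem?_eq_some_iff.mp h0).1, h0, ?_⟩
  have h2 : lista.drop (k+1) = (lista.drop k).drop 1 := by rw [List.drop_drop]
  simp [h2, h]

lemma pvA_loop (lista : List Int) (xs : List Int) :
    ∀ (k : Nat) (acc : List Int) (m : Int), 1 ≤ k → lista.drop k = xs →
    ((PySem.List.pyRange (k : Int) (lista.length : Int) 1).foldl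
      (fun (st : List Int × Int) i =>
        if i == 0 then (st.1 ++ [i], PySem.List.pyGetD lista i 0)
        else if PySem.List.pyGetD lista i 0 ≥ st.2 then (st.1 ++ [i], PySem.List.pyGetD lista i 0)
        else st)
      (acc, m)).1 = acc ++ pvGo xs (k : Int) m := by
  induction xs with
  | nil =>
    intro k acc m hk hd
    rw [PySem.List.pyRange_one_eq_nil (by exact_mod_cast List.drop_eq_nil_iff.mp hd)]
    simp [pvGo]
  | cons x xs ih =>
    intro k acc m hk hd
    obtain ⟨hklt, hget, hdrop⟩ := pvDrop_cons hd
    rw [PySem.List.pyRange_one_cons (by exact_mod_cast hklt)]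
    have hne : ((k : Int) == 0) = false := by
      simp; omega
    have hgd : PySem.List.pyGetD lista (k : Int) 0 = x := by
      simp [PySem.List.pyGetD_natCast, List.getD_eq_getElem?_getD, hget]
    have hcast : ((k : Int) + 1) = ((k + 1 : Nat) : Int) := by push_cast; ring
    simp only [List.foldl_cons, hne, Bool.false_eq_true, if_false, hgd]
    by_cases hmx : x ≥ m
    · simp only [hmx, if_true]
      rw [hcast, ih (k+1) (acc ++ [(k : Int)]) x (by omega) hdrop]
      have hle : m ≤ x := hmx
      simp only [pvGo, hle, if_true, List.append_assoc, List.cons_append, List.nil_append]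
      norm_cast
    · simp only [hmx, if_false]
      rw [hcast, ih (k+1) acc m (by omega) hdrop]
      have hnot : ¬ m ≤ x := by omega
      simp only [pvGo, hnot, if_false]
      norm_cast

lemma pvRun_loop (xs : List Int) :
    ∀ (acc : List Int) (m : Int),
    (xs.foldl
      (fun (acc : List Int × Option Int) x =>
        ((acc.1 ++ [match acc.2 with
          | none => x
          | some m0 => max m0 x],
          some (match acc.2 with
          | none => x
          | some m0 => max m0 x)) : List Int × Option Int))
      (acc, some m)).1 = acc ++ pvPmax xs m := by
  induction xs with
  | nil => intro acc m; simp [pvPmax]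
  | cons x xs ih =>
    intro acc m
    simp only [List.foldl_cons]
    rw [ih (acc ++ [max m x]) (max m x)]
    simp [pvPmax]

lemma pvB_loop (lista running : List Int) (xs : List Int) :
    ∀ (k : Nat) (m : Int), lista.drop k = xs → running.drop k = pvPmax xs m →
    (PySem.List.pyRange (k : Int) (lista.length : Int) 1).filter
      (fun i => PySem.List.pyGetD lista i 0 == PySem.List.pyGetD running i 0)
      = pvGo xs (k : Int) m := by
  induction xs with
  | nil =>
    intro k m hd _
    rw [PySem.List.pyRange_one_eq_nil (by exact_mod_cast List.drop_eq_nil_iff.mp hd)]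
    simp [pvGo]
  | cons x xs ih =>
    intro k m hd hr
    obtain ⟨hklt, hget, hdrop⟩ := pvDrop_cons hd
    have hr' : running.drop k = max m x :: pvPmax xs (max m x) := by simpa [pvPmax] using hr
    obtain ⟨hklt', hgetr, hdropr⟩ := pvDrop_cons hr'
    rw [PySem.List.pyRange_one_cons (by exact_mod_cast hklt)]
    have hgd : PySem.List.pyGetD lista (k : Int) 0 = x := by
      simp [PySem.List.pyGetD_natCast, List.getD_eq_getElem?_getD, hget]
    have hgdr : PySem.List.pyGetD running (k : Int) 0 = max m x := by
      simp [PySem.List.pyGetD_natCast, List.getD_eq_getElem?_getD, hgetr]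
    have hcast : ((k : Int) + 1) = ((k + 1 : Nat) : Int) := by push_cast; ring
    by_cases hmx : m ≤ x
    · have hmax : max m x = x := max_eq_right hmx
      have hcond : (x == max m x) = true := by simp [hmax]
      simp only [List.filter_cons, hgd, hgdr, hcond, if_true]
      rw [hcast, ih (k+1) x hdrop (by rwa [hmax] at hdropr)]
      simp only [pvGo, hmx, if_true]
      norm_cast
    · have hmax : max m x = m := max_eq_left (by omega)
      have hcond : (x == max m x) = false := by simp [hmax]; omega
      simp only [List.filter_cons, hgd, hgdr, hcond, Bool.false_eq_true, if_false]
      rw [hcast, ih (k+1) m hdrop (by rwa [hmax] at hdropr)]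
      simp only [pvGo, hmx, if_false]
      norm_cast

lemma pvA_eq (lista : List Int) :
    posiciones_maximo lista = match lista with
      | [] => []
      | x :: xs => 0 :: pvGo xs 1 x := by
  cases lista with
  | nil => simp [posiciones_maximo, PySem.List.pyRange_one_eq_nil]
  | cons x xs =>
    unfold posiciones_maximo
    rw [PySem.List.pyRange_one_cons (by simp)]
    simp only [List.foldl_cons]
    have h0 : PySem.List.pyGetD (x :: xs) 0 0 = x := by simp [PySem.List.pyGetD_zero_cons]
    simp only [beq_self_eq_true, if_true, h0, List.nil_append]
    have := pvA_loop (x :: xs) xs 1 [(0 : Int)] x (by omega) (by simp)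
    simpa using this

lemma pvB_eq (lista : List Int) :
    posiciones_maximo_alt lista = match lista with
      | [] => []
      | x :: xs => 0 :: pvGo xs 1 x := by
  cases lista with
  | nil => simp [posiciones_maximo_alt, PySem.List.pyRange_one_eq_nil]
  | cons x xs =>
    unfold posiciones_maximo_alt
    have hrun : ((x :: xs).foldl
      (fun (acc : List Int × Option Int) y =>
        ((acc.1 ++ [match acc.2 with
          | none => y
          | some m0 => max m0 y],
          some (match acc.2 with
          | none => y
          | some m0 => max m0 y)) : List Int × Option Int))
      ([], none)).1 = x :: pvPmax xs x := by
      simp only [List.foldl_cons]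
      rw [pvRun_loop xs ([] ++ [x]) x]
      simp
    simp only [hrun]
    rw [PySem.List.pyRange_one_cons (by simp)]
    have hgd : PySem.List.pyGetD (x :: xs) 0 0 = x := by simp [PySem.List.pyGetD_zero_cons]
    have hgdr : PySem.List.pyGetD (x :: pvPmax xs x) 0 0 = x := by simp [PySem.List.pyGetD_zero_cons]
    simp only [List.filter_cons, hgd, hgdr, beq_self_eq_true, if_true]
    have := pvB_loop (x :: xs) (x :: pvPmax xs x) xs 1 x (by simp) (by simp)
    simpa using this

-- ===== VERDICT (by name: the statement is the Claim_ definition above) =====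
theorem posiciones_maximo_spec : Claim_equal_posiciones_maximo := by
  intro lista _
  unfold Spec_posiciones_maximo
  rw [pvA_eq, pvB_eq]
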